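-- pv_equiv track=rewrite | github.com/gtuck/web1430-Course-Docs | scripts/grade_ch3_codepen.py | check_fix_me
-- ===== SOURCE A (Python) =====
-- from typing import Any, Dict, List, Optional, Tuple
--
-- def check_fix_me(lines: List[str]) -> Tuple[int, int, str]:
--     # 5a) expects OK
--     ok_a = 'OK' in lines
--     # 5b) expects only 'greater'
--     count_greater = sum(1 for l in lines if l == 'greater')
--     count_not = sum(1 for l in lines if l == 'not greater')
--     ok_b = count_greater >= 1 and count_not == 0
--     # 5c) for v=2 expects only 'two'
--     count_two = sum(1 for l in lines if l == 'two')
--     count_one = sum(1 for l in lines if l == 'one')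
--     count_other = sum(1 for l in lines if l == 'other')
--     ok_c = count_two >= 1 and (count_one + count_other) == 0
--     # Score: any two -> 2 points, all three -> 3
--     ok_count = sum([ok_a, ok_b, ok_c])
--     score = 3 if ok_count == 3 else (2 if ok_count >= 2 else 0)
--     return score, 3, f"a={ok_a}, b={ok_b}, c={ok_c}"
-- ===== SOURCE B (Python) =====
-- def check_fix_me(lines):
--     # One pass; no counts: each condition only needs presence/absence flags.
--     saw_ok = saw_greater = saw_not = saw_two = saw_bad_c = False
--     for l in lines:
--         if l == 'OK':
--             saw_ok = True
--         elif l == 'greater':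
--             saw_greater = True
--         elif l == 'not greater':
--             saw_not = True
--         elif l == 'two':
--             saw_two = True
--         elif l == 'one' or l == 'other':
--             saw_bad_c = True
--     ok_a = saw_ok
--     ok_b = saw_greater and not saw_not
--     ok_c = saw_two and not saw_bad_c
--     ok_count = ok_a + ok_b + ok_c
--     score = 3 if ok_count == 3 else (2 if ok_count >= 2 else 0)
--     return score, 3, f"a={ok_a}, b={ok_b}, c={ok_c}"
-- ===== Notes on version B (the rewrite author's own statement) =====
-- stated objective: simpler
-- what changed: B replaces A's membership test plus five per-value counting scans by one pass that keeps five presence/absence boolean flags, using the fact that every condition (count>=1 / count==0) is just presence or absence of a sentinel line, so no counts are computed at all.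
import Mathlib
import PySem

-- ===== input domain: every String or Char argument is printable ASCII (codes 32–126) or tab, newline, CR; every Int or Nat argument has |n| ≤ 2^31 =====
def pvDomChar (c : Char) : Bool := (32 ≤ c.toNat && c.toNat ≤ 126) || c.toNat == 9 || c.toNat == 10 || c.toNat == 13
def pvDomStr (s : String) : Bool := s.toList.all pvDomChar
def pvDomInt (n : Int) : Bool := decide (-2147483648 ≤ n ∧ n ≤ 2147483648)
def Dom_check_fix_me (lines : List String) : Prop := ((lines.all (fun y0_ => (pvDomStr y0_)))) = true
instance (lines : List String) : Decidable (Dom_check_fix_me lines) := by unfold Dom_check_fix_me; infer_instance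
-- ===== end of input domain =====

-- B replaces A's membership test plus five counting scans by ONE pass keeping five
-- presence/absence boolean flags — no counts are computed at all (objective: simpler).

-- helper shared by both ports: Python's str(bool) as rendered inside the f-string
def pyBoolStr (b : Bool) : String := if b then "True" else "False"

-- ===== PORT A =====
def check_fix_me (lines : List String) : Int × Int × String :=
  let ok_a : Bool := lines.contains "OK"
  let count_greater : Int := lines.foldl (fun acc l => if l = "greater" then acc + 1 else acc) 0
  let count_not : Int := lines.foldl (fun acc l => if l = "not greater" then acc + 1 else acc) 0
  let ok_b : Bool := decide (1 ≤ count_greater) && decide (count_not = 0)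
  let count_two : Int := lines.foldl (fun acc l => if l = "two" then acc + 1 else acc) 0
  let count_one : Int := lines.foldl (fun acc l => if l = "one" then acc + 1 else acc) 0
  let count_other : Int := lines.foldl (fun acc l => if l = "other" then acc + 1 else acc) 0
  let ok_c : Bool := decide (1 ≤ count_two) && decide (count_one + count_other = 0)
  let ok_count : Int := (if ok_a then 1 else 0) + (if ok_b then 1 else 0) + (if ok_c then 1 else 0)
  let score : Int := if ok_count = 3 then 3 else if 2 ≤ ok_count then 2 else 0
  (score, 3, "a=" ++ pyBoolStr ok_a ++ ", b=" ++ pyBoolStr ok_b ++ ", c=" ++ pyBoolStr ok_c)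

-- ===== PORT B =====
-- B's loop body: the elif chain updating the five flags
def cfmStep (s : Bool × Bool × Bool × Bool × Bool) (l : String) : Bool × Bool × Bool × Bool × Bool :=
  if l = "OK" then (true, s.2.1, s.2.2.1, s.2.2.2.1, s.2.2.2.2)
  else if l = "greater" then (s.1, true, s.2.2.1, s.2.2.2.1, s.2.2.2.2)
  else if l = "not greater" then (s.1, s.2.1, true, s.2.2.2.1, s.2.2.2.2)
  else if l = "two" then (s.1, s.2.1, s.2.2.1, true, s.2.2.2.2)
  else if l = "one" ∨ l = "other" then (s.1, s.2.1, s.2.2.1, s.2.2.2.1, true)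
  else s

def check_fix_me_alt (lines : List String) : Int × Int × String :=
  let s := lines.foldl cfmStep (false, false, false, false, false)
  let ok_a : Bool := s.1
  let ok_b : Bool := s.2.1 && !s.2.2.1
  let ok_c : Bool := s.2.2.2.1 && !s.2.2.2.2
  let ok_count : Int := (if ok_a then 1 else 0) + (if ok_b then 1 else 0) + (if ok_c then 1 else 0)
  let score : Int := if ok_count = 3 then 3 else if 2 ≤ ok_count then 2 else 0
  (score, 3, "a=" ++ pyBoolStr ok_a ++ ", b=" ++ pyBoolStr ok_b ++ ", c=" ++ pyBoolStr ok_c)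

-- ===== PRECONDITION & SPEC =====
def Spec_check_fix_me (lines : List String) (out : Int × Int × String) : Prop := out = check_fix_me_alt lines
instance (lines : List String) (out : Int × Int × String) : Decidable (Spec_check_fix_me lines out) := by unfold Spec_check_fix_me; infer_instance

-- ===== CLAIM (what is proved, stated in full; the proofs are below) =====
def Claim_equal_check_fix_me : Prop := ∀ (lines : List String), Dom_check_fix_me lines → Spec_check_fix_me lines (check_fix_me lines)

-- ===== LEMMAS AND PROOFS =====

-- B's flag fold computes the five membership flags
theorem fold_flags (lines : List String) (s : Bool × Bool × Bool × Bool × Bool) :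
    lines.foldl cfmStep s
      = (s.1 || lines.contains "OK",
         s.2.1 || lines.contains "greater",
         s.2.2.1 || lines.contains "not greater",
         s.2.2.2.1 || lines.contains "two",
         s.2.2.2.2 || (lines.contains "one" || lines.contains "other")) := by
  induction lines generalizing s with
  | nil => simp
  | cons x xs ih =>
    simp only [List.foldl_cons, ih, cfmStep]
    split_ifs with h1 h2 h3 h4 h5
    · subst h1; simp
    · subst h2; simp [h1]
    · subst h3; simp [h1, h2]
    · subst h4; simp [h1, h2, h3]
    · rcases h5 with h | h <;> subst h <;> simp [h1, h2, h3, h4]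
    · have h5a : ¬ x = "one" := fun h => h5 (Or.inl h)
      have h5b : ¬ x = "other" := fun h => h5 (Or.inr h)
      simp [Ne.symm h1, Ne.symm h2, Ne.symm h3, Ne.symm h4, Ne.symm h5a, Ne.symm h5b]

-- A's conditional-sum fold counts occurrences
theorem foldl_count_eq (lines : List String) (v : String) :
    lines.foldl (fun acc l => if l = v then acc + 1 else acc) (0 : Int) = (lines.count v : Int) := by
  have h : ∀ (init : Int), lines.foldl (fun acc l => if l = v then acc + 1 else acc) init
      = init + (lines.count v : Int) := by
    induction lines with
    | nil => intro init; simp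
    | cons x xs ih =>
      intro init
      simp only [List.foldl_cons, List.count_cons, ih]
      by_cases hx : x = v <;> simp [hx, beq_iff_eq] <;> push_cast <;> ring
  simpa using h 0

theorem count_pos_eq_contains (lines : List String) (v : String) :
    decide (1 ≤ (lines.count v : Int)) = lines.contains v := by
  by_cases hm : v ∈ lines
  · have h1 : 1 ≤ lines.count v := List.one_le_count_iff.mpr hm
    simp [hm]
  · have h1 : lines.count v = 0 := List.count_eq_zero.mpr hm
    simp [List.contains_iff_mem, hm, h1]

theorem count_zero_eq_not_contains (lines : List String) (v : String) :
    decide ((lines.count v : Int) = 0) = !lines.contains v := by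
  by_cases hm : v ∈ lines
  · have h1 : 1 ≤ lines.count v := List.one_le_count_iff.mpr hm
    simp [List.contains_iff_mem, hm]
    omega
  · have h1 : lines.count v = 0 := List.count_eq_zero.mpr hm
    simp [List.contains_iff_mem, hm, h1]

theorem count_sum_zero (lines : List String) (v w : String) :
    decide ((lines.count v : Int) + (lines.count w : Int) = 0)
      = (!lines.contains v && !lines.contains w) := by
  have hv : (0:Int) ≤ (lines.count v : Int) := by positivity
  have hw : (0:Int) ≤ (lines.count w : Int) := by positivity
  have h : ((lines.count v : Int) + (lines.count w : Int) = 0)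
      ↔ ((lines.count v : Int) = 0 ∧ (lines.count w : Int) = 0) := by omega
  rw [show decide ((lines.count v : Int) + (lines.count w : Int) = 0)
      = (decide ((lines.count v : Int) = 0) && decide ((lines.count w : Int) = 0)) by
        simp [h]]
  rw [count_zero_eq_not_contains, count_zero_eq_not_contains]

-- ===== VERDICT (by name: the statement is the Claim_ definition above) =====
theorem check_fix_me_spec : Claim_equal_check_fix_me := by
  intro lines _
  unfold Spec_check_fix_me check_fix_me check_fix_me_alt
  simp only [fold_flags, foldl_count_eq, Bool.false_or]
  rw [count_pos_eq_contains, count_pos_eq_contains, count_zero_eq_not_contains, count_sum_zero]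
  simp [Bool.not_or]
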